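-- pv_equiv track=rewrite | github.com/callmewenhao/leetcode | offer/数学/findContinuousSequence.py | findContinuousSequence1
-- ===== SOURCE A (Python) =====
-- from typing import List
--
-- def findContinuousSequence1(target: int) -> List[List[int]]:
--     ans = []
--     for i in range(1, target // 2 + 1):
--         l, r = i, target
--         while l <= r:
--             mid = l + (r - l) // 2
--             sum = (i + mid) * (mid - i + 1) // 2
--             if sum >= target:
--                 r = mid - 1
--             else:
--                 l = mid + 1
--         s = (i + l) * (l - i + 1) // 2
--         if s == target:
--             ans.append([_ for _ in range(i, l + 1)])
--     return ans
-- ===== SOURCE B (Python) =====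
-- from typing import List
--
-- def findContinuousSequence1(target: int) -> List[List[int]]:
--     # Sliding window over [l, r]; s is always the sum l + (l+1) + ... + r.
--     ans = []
--     l, r, s = 1, 2, 3
--     while l < r:
--         if s < target:
--             r += 1
--             s += r
--         else:
--             if s == target:
--                 ans.append(list(range(l, r + 1)))
--             s -= l
--             l += 1
--     return ans
-- ===== Notes on version B (the rewrite author's own statement) =====
-- stated objective: faster
-- what changed: A runs a fresh binary search over the end index for every candidate start (O(target log target)); B sweeps a single sliding window with two pointers and a running sum over the whole range once (O(target)).
import Mathlib
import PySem

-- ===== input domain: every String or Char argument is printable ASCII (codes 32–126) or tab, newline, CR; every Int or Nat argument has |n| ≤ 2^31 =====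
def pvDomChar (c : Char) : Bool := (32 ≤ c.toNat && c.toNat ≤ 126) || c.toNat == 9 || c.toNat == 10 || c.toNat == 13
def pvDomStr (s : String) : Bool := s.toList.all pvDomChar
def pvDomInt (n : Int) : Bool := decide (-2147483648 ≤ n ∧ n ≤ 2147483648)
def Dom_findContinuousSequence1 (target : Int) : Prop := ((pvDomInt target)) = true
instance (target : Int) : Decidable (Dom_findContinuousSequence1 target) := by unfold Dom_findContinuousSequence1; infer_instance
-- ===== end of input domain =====

-- B replaces A's per-start binary search by a single sliding window over [l, r]
-- maintaining the running sum (objective: faster, one pass over the start/end pointers).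

-- ===== PORT A =====
-- A's inner `while l <= r` binary search; returns the final value of l.
def fcsBS (target i l r : Int) : Int :=
  if _h : l ≤ r then
    let mid := l + PySem.Int.floordiv (r - l) 2
    let sum := PySem.Int.floordiv ((i + mid) * (mid - i + 1)) 2
    if sum ≥ target then fcsBS target i l (mid - 1) else fcsBS target i (mid + 1) r
  else l
termination_by (r + 1 - l).toNat
decreasing_by
  · simp only [PySem.Int.floordiv_eq_ediv_of_pos (by norm_num : (0:Int) < 2)]; omega
  · simp only [PySem.Int.floordiv_eq_ediv_of_pos (by norm_num : (0:Int) < 2)]; omega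

-- body of A's `for i in range(1, target // 2 + 1)` loop
def fcsStep (target : Int) (ans : List (List Int)) (i : Int) : List (List Int) :=
  let l := fcsBS target i i target
  let s := PySem.Int.floordiv ((i + l) * (l - i + 1)) 2
  if s = target then ans ++ [PySem.List.pyRange i (l + 1) 1] else ans

def findContinuousSequence1 (target : Int) : List (List Int) :=
  (PySem.List.pyRange 1 (PySem.Int.floordiv target 2 + 1) 1).foldl (fcsStep target) []

-- ===== PORT B =====
-- Σ_{k=a..b} k, written exactly as the Python sums appear: (a+b)*(b-a+1)//2.
def Ssum (a b : Int) : Int := PySem.Int.floordiv ((a + b) * (b - a + 1)) 2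

theorem Ssum_two_mul (a b : Int) : 2 * Ssum a b = (a + b) * (b - a + 1) := by
  have hdvd : (2 : Int) ∣ (a + b) * (b - a + 1) := by
    rcases Int.even_or_odd (a + b) with h | h
    · exact Dvd.dvd.mul_right h.two_dvd _
    · have : Even (b - a + 1) := by
        rw [Int.even_iff]; rw [Int.odd_iff] at h; omega
      exact Dvd.dvd.mul_left this.two_dvd _
  rw [Ssum, PySem.Int.floordiv_eq_ediv_of_pos (by norm_num)]
  exact Int.mul_ediv_cancel' hdvd

theorem Ssum_succ (a b : Int) : Ssum a (b + 1) = Ssum a b + (b + 1) := by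
  have h3 : 2 * Ssum a (b + 1) = 2 * Ssum a b + 2 * (b + 1) := by
    rw [Ssum_two_mul, Ssum_two_mul]; ring
  omega

theorem Ssum_shift (a b : Int) : Ssum (a + 1) b = Ssum a b - a := by
  have h3 : 2 * Ssum (a + 1) b = 2 * Ssum a b - 2 * a := by
    rw [Ssum_two_mul, Ssum_two_mul]; ring
  omega

theorem Ssum_ge_add {l r : Int} (hl : 1 ≤ l) (hlr : l < r) : l + r ≤ Ssum l r := by
  have h := Ssum_two_mul l r
  nlinarith [mul_nonneg (by omega : (0:Int) ≤ l + r) (by omega : (0:Int) ≤ r - l - 1)]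

-- B's `while l < r` sliding-window loop.  The extra `h…` arguments are ghost
-- invariants (s is really the sum l+…+r) needed only so Lean can see termination;
-- the loop guard is checked before each recursive call, which is the same
-- computation as Python's top-tested while loop.
def fcsWin (target l r s : Int) (ans : List (List Int))
    (hl : 1 ≤ l) (hlr : l < r) (hs : s = Ssum l r)
    (hr : r ≤ target + 1 ∨ (l = 1 ∧ r = 2)) : List (List Int) :=
  if hst : s < target then
    fcsWin target l (r + 1) (s + (r + 1)) ans hl (by omega)
      (by rw [hs]; exact (Ssum_succ l r).symm)
      (by left; have := Ssum_ge_add hl hlr; omega)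
  else
    let ans' := if s = target then ans ++ [PySem.List.pyRange l (r + 1) 1] else ans
    if h2 : l + 1 < r then
      fcsWin target (l + 1) r (s - l) ans' (by omega) h2
        (by rw [hs]; exact (Ssum_shift l r).symm)
        (by rcases hr with h | h; exacts [Or.inl h, Or.inl (by omega)])
    else ans'
termination_by ((target + 1 - l).toNat + (target + 2 - r).toNat)
decreasing_by
  · have := Ssum_ge_add hl hlr; omega
  · rcases hr with h | h
    · omega
    · omega

def findContinuousSequence1_alt (target : Int) : List (List Int) :=
  fcsWin target 1 2 3 [] (by norm_num) (by norm_num) (by decide) (Or.inr ⟨rfl, rfl⟩)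

-- ===== PRECONDITION & SPEC =====
def Spec_findContinuousSequence1 (target : Int) (out : List (List Int)) : Prop := out = findContinuousSequence1_alt target
instance (target : Int) (out : List (List Int)) : Decidable (Spec_findContinuousSequence1 target out) := by unfold Spec_findContinuousSequence1; infer_instance

-- ===== CLAIM (what is proved, stated in full; the proofs are below) =====
def Claim_equal_findContinuousSequence1 : Prop := ∀ (target : Int), Dom_findContinuousSequence1 target → Spec_findContinuousSequence1 target (findContinuousSequence1 target)

-- ===== LEMMAS AND PROOFS =====

theorem Ssum_base (a : Int) : Ssum a (a - 1) = 0 := by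
  have h := Ssum_two_mul a (a - 1)
  have h2 : (a + (a - 1)) * ((a - 1) - a + 1) = 0 := by ring
  omega

theorem Ssum_self (a : Int) : Ssum a a = a := by
  have h := Ssum_two_mul a a
  have h2 : (a + a) * (a - a + 1) = 2 * a := by ring
  omega


theorem Ssum_mono {a x y : Int} (ha : 1 ≤ a) (hx : a - 1 ≤ x) (hxy : x ≤ y) :
    Ssum a x ≤ Ssum a y := by
  have key : ∀ (n : Nat) (y : Int), (y - x).toNat = n → x ≤ y → Ssum a x ≤ Ssum a y := by
    intro n
    induction n with
    | zero =>
      intro y hn hxy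
      have hyx : y = x := by omega
      rw [hyx]
    | succ n ih =>
      intro y hn hxy
      have hy : x ≤ y - 1 := by omega
      have h1 := ih (y - 1) (by omega) hy
      have h2 := Ssum_succ a (y - 1)
      have h3 : y - 1 + 1 = y := by omega
      rw [h3] at h2
      omega
  exact key _ y rfl hxy

theorem Ssum_ge_n (a : Int) (ha : 1 ≤ a) (n : Nat) : (n : Int) ≤ Ssum a (a - 1 + n) := by
  induction n with
  | zero => simp [Ssum_base a]
  | succ n ih =>
    have h2 := Ssum_succ a (a - 1 + n)
    push_cast
    push_cast at ih
    have h4 : a - 1 + ((n : Int) + 1) = a - 1 + (n : Int) + 1 := by ring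
    rw [h4]
    omega

theorem Ssum_ex (target a : Int) (ha : 1 ≤ a) : ∃ n : Nat, target ≤ Ssum a (a - 1 + n) := by
  refine ⟨target.toNat, le_trans (by omega) (Ssum_ge_n a ha target.toNat)⟩

-- the least j ≥ a-1 with Ssum a j ≥ target
def Nfun (target a : Int) (ha : 1 ≤ a) : Int := a - 1 + Nat.find (Ssum_ex target a ha)

def NfunT (target a : Int) : Int := if ha : 1 ≤ a then Nfun target a ha else a - 1

theorem Nfun_ge {target a : Int} (ha : 1 ≤ a) : a - 1 ≤ Nfun target a ha := by
  unfold Nfun; omega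

theorem Nfun_spec {target a : Int} (ha : 1 ≤ a) : target ≤ Ssum a (Nfun target a ha) :=
  Nat.find_spec (Ssum_ex target a ha)

theorem Nfun_min {target a x : Int} (ha : 1 ≤ a) (hx : a - 1 ≤ x)
    (hlt : x < Nfun target a ha) : Ssum a x < target := by
  have h := Nat.find_min (Ssum_ex target a ha) (m := (x - (a - 1)).toNat)
    (by unfold Nfun at hlt; omega)
  have h2 : a - 1 + ((x - (a - 1)).toNat : Int) = x := by omega
  rw [h2] at h
  omega

theorem Nfun_unique {target a l : Int} (ha : 1 ≤ a) (h0 : a - 1 ≤ l)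
    (hup : target ≤ Ssum a l)
    (hlow : ∀ x, a - 1 ≤ x → x < l → Ssum a x < target) : l = Nfun target a ha := by
  rcases lt_trichotomy l (Nfun target a ha) with h | h | h
  · exact absurd hup (by simpa using Nfun_min ha h0 h)
  · exact h
  · exact absurd (Nfun_spec ha) (by simpa using hlow _ (Nfun_ge ha) h)

-- the common specification both loops are reduced to
def specFrom (target l : Int) : List (List Int) :=
  (PySem.List.pyRange l (PySem.Int.floordiv target 2 + 1) 1).filterMap
    (fun i => if Ssum i (NfunT target i) = target then
                some (PySem.List.pyRange i (NfunT target i + 1) 1) else none)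

theorem bs_correct (target i : Int) (hi : 1 ≤ i) :
    ∀ l r : Int, i ≤ l → l ≤ r + 1 →
    (∀ x, i - 1 ≤ x → x < l → Ssum i x < target) →
    (∀ x, i - 1 ≤ x → r < x → target ≤ Ssum i x) →
    fcsBS target i l r = Nfun target i hi := by
  have key : ∀ (n : Nat), ∀ l r : Int, (r + 1 - l).toNat = n → i ≤ l → l ≤ r + 1 →
      (∀ x, i - 1 ≤ x → x < l → Ssum i x < target) →
      (∀ x, i - 1 ≤ x → r < x → target ≤ Ssum i x) →
      fcsBS target i l r = Nfun target i hi := by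
    intro n
    induction n using Nat.strong_induction_on with
    | _ n ih =>
      intro l r hn hil hlr hlow hhigh
      rw [fcsBS]
      by_cases hle : l ≤ r
      · rw [dif_pos hle]
        have hmb : l ≤ l + PySem.Int.floordiv (r - l) 2 ∧ l + PySem.Int.floordiv (r - l) 2 ≤ r := by
          rw [PySem.Int.floordiv_eq_ediv_of_pos (by norm_num : (0:Int) < 2)]
          omega
        set mid := l + PySem.Int.floordiv (r - l) 2 with hmid
        by_cases hge : PySem.Int.floordiv ((i + mid) * (mid - i + 1)) 2 ≥ target
        · rw [if_pos hge]
          have hT : target ≤ Ssum i mid := hge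
          exact ih ((mid - 1) + 1 - l).toNat (by omega) l (mid - 1) rfl hil (by omega) hlow
            (fun x hx hmx => le_trans hT (Ssum_mono hi (by omega) (by omega)))
        · rw [if_neg hge]
          have hT : Ssum i mid < target := by unfold Ssum; omega
          exact ih (r + 1 - (mid + 1)).toNat (by omega) (mid + 1) r rfl (by omega) (by omega)
            (fun x hx hxm => lt_of_le_of_lt (Ssum_mono hi hx (by omega)) hT)
            hhigh
      · rw [dif_neg hle]
        exact Nfun_unique hi (by omega) (hhigh l (by omega) (by omega)) hlow
  exact fun l r h1 h2 h3 h4 => key (r + 1 - l).toNat l r rfl h1 h2 h3 h4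

theorem A_loop (target : Int) (hT : 2 ≤ target) :
    ∀ (n : Nat) (l : Int), (PySem.Int.floordiv target 2 + 1 - l).toNat = n → 1 ≤ l →
    ∀ acc : List (List Int),
    (PySem.List.pyRange l (PySem.Int.floordiv target 2 + 1) 1).foldl (fcsStep target) acc
      = acc ++ specFrom target l := by
  intro n
  induction n using Nat.strong_induction_on with
  | _ n ih =>
    intro l hn hl acc
    have hd : PySem.Int.floordiv target 2 = target / 2 :=
      PySem.Int.floordiv_eq_ediv_of_pos (by norm_num)
    by_cases hend : PySem.Int.floordiv target 2 + 1 ≤ l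
    · rw [PySem.List.pyRange_one_eq_nil hend]
      unfold specFrom
      rw [PySem.List.pyRange_one_eq_nil hend]
      simp
    · have h2l : 2 * l ≤ target := by omega
      have hbs : fcsBS target l l target = Nfun target l hl := by
        apply bs_correct target l hl l target le_rfl (by omega)
        · intro x hx hxl
          have hxeq : x = l - 1 := by omega
          rw [hxeq, Ssum_base]; omega
        · intro x hx htx
          have h1 : target ≤ Ssum l target := by
            nlinarith [Ssum_two_mul l target,
              mul_nonneg (by omega : (0:Int) ≤ target - l) (by omega : (0:Int) ≤ target + l - 1)]
          exact le_trans h1 (Ssum_mono hl (by omega) (by omega))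
      have hNT : NfunT target l = Nfun target l hl := dif_pos hl
      unfold specFrom
      rw [PySem.List.pyRange_one_cons (by omega : l < PySem.Int.floordiv target 2 + 1)]
      simp only [List.foldl_cons, List.filterMap_cons]
      have hstep : fcsStep target acc l =
          (if Ssum l (NfunT target l) = target then
            acc ++ [PySem.List.pyRange l (NfunT target l + 1) 1] else acc) := by
        simp only [fcsStep, hbs, hNT]
        rfl
      rw [hstep]
      have ihr := fun acc' => ih (PySem.Int.floordiv target 2 + 1 - (l + 1)).toNat (by omega)
        (l + 1) rfl (by omega) acc'
      unfold specFrom at ihr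
      by_cases hc : Ssum l (NfunT target l) = target
      · rw [if_pos hc, if_pos hc, ihr]
        simp
      · rw [if_neg hc, if_neg hc, ihr]

theorem win_correct (target : Int) :
    ∀ (n : Nat) (l r s : Int) (ans : List (List Int)) hl hlr hs hr,
    ((target + 1 - l).toNat + (target + 2 - r).toNat) = n →
    Ssum l (r - 1) < target →
    fcsWin target l r s ans hl hlr hs hr = ans ++ specFrom target l := by
  intro n
  induction n using Nat.strong_induction_on with
  | _ n ih =>
    intro l r s ans hl hlr hs hr hn hprev
    have hd : PySem.Int.floordiv target 2 = target / 2 :=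
      PySem.Int.floordiv_eq_ediv_of_pos (by norm_num)
    have hga : l + r ≤ s := hs ▸ Ssum_ge_add hl hlr
    rw [fcsWin]
    by_cases hst : s < target
    · rw [dif_pos hst]
      have hrT : r < target := by omega
      have hprev' : Ssum l (r + 1 - 1) < target := by
        have he : r + 1 - 1 = r := by ring
        rw [he, ← hs]; exact hst
      exact ih _ (by omega) l (r + 1) (s + (r + 1)) ans hl _ _ _ rfl hprev'
    · rw [dif_neg hst]
      have hts : target ≤ s := by omega
      have hNr : r = Nfun target l hl := by
        refine Nfun_unique hl (by omega) (by rw [← hs]; exact hts) ?_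
        intro x hx hxr
        exact lt_of_le_of_lt (Ssum_mono hl hx (by omega)) hprev
      have hNT : NfunT target l = r := by rw [NfunT, dif_pos hl, ← hNr]
      have hspec : specFrom target l =
          (if s = target then [PySem.List.pyRange l (r + 1) 1] else []) ++ specFrom target (l + 1) := by
        by_cases hlt : l < PySem.Int.floordiv target 2 + 1
        · unfold specFrom
          rw [PySem.List.pyRange_one_cons hlt]
          simp only [List.filterMap_cons, hNT, ← hs]
          by_cases hc : s = target
          · simp [hc]
          · simp [hc]
        · have hsne : s ≠ target := by
            intro hc
            have h1 : Ssum l r = target := by rw [← hs, hc]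
            omega
          unfold specFrom
          rw [PySem.List.pyRange_one_eq_nil (a := l) (b := PySem.Int.floordiv target 2 + 1) (by omega),
            PySem.List.pyRange_one_eq_nil (a := l + 1) (b := PySem.Int.floordiv target 2 + 1) (by omega)]
          simp [hsne]
      by_cases h2 : l + 1 < r
      · rw [dif_pos h2]
        have hlT : l ≤ target - 1 := by
          rcases hr with h | h
          · omega
          · omega
        have hprev' : Ssum (l + 1) (r - 1) < target := by
          rw [Ssum_shift]; omega
        rw [ih _ (by omega) (l + 1) r (s - l) _ _ _ _ _ rfl hprev', hspec]
        by_cases hc : s = target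
        · simp [hc]
        · simp [hc]
      · rw [dif_neg h2]
        have hreq : r = l + 1 := by omega
        have hsv : s = 2 * l + 1 := by
          rw [hs, hreq]
          have h1 := Ssum_succ l l
          have h2' := Ssum_self l
          omega
        have htail : specFrom target (l + 1) = [] := by
          unfold specFrom
          rw [PySem.List.pyRange_one_eq_nil (a := l + 1) (b := PySem.Int.floordiv target 2 + 1) (by omega)]
          rfl
        rw [hspec, htail]
        by_cases hc : s = target
        · simp [hc]
        · simp [hc]

-- ===== VERDICT (by name: the statement is the Claim_ definition above) =====
theorem findContinuousSequence1_spec : Claim_equal_findContinuousSequence1 := by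
  intro target _
  unfold Spec_findContinuousSequence1
  have hd : PySem.Int.floordiv target 2 = target / 2 :=
    PySem.Int.floordiv_eq_ediv_of_pos (by norm_num)
  by_cases hT : 2 ≤ target
  · have hA := A_loop target hT _ 1 rfl (by norm_num) []
    have hpre : Ssum 1 (2 - 1) < target := by
      have h1 : Ssum 1 (2 - 1) = 1 := by decide
      omega
    calc findContinuousSequence1 target = [] ++ specFrom target 1 := hA
      _ = findContinuousSequence1_alt target := by
          unfold findContinuousSequence1_alt
          exact (win_correct target _ 1 2 3 [] _ _ _ _ rfl hpre).symm
  · have hA : findContinuousSequence1 target = [] := by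
      unfold findContinuousSequence1
      rw [PySem.List.pyRange_one_eq_nil (by omega)]
      rfl
    have hB : findContinuousSequence1_alt target = [] := by
      unfold findContinuousSequence1_alt
      rw [fcsWin]
      rw [dif_neg (by omega : ¬ (3:Int) < target)]
      simp [show (3:Int) ≠ target by omega]
    rw [hA, hB]
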